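-- pv_equiv track=rewrite | github.com/johnowhitaker/antelope_park_pursuit | labeltool/app.py | image_to_tasks_map
-- ===== SOURCE A (Python) =====
-- def image_to_tasks_map(tasks):
--     mapping = {}
--     for t in tasks:
--         url = (t.get('photoURL') or '').strip()
--         if not url:
--             continue
--         # extract filename
--         name = url.split('/')[-1]
--         mapping.setdefault(name, []).append(t)
--     return mapping
-- ===== SOURCE B (Python) =====
-- def image_to_tasks_map(tasks):
--     # Pair each task that has a usable photoURL with its filename,
--     # then build the group for each distinct filename in first-seen order.
--     keyed = []
--     for t in tasks:
--         url = (t.get('photoURL') or '').strip()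
--         if url:
--             keyed.append((url.split('/')[-1], t))
--     names = list(dict.fromkeys(k for k, _ in keyed))
--     return {name: [t for k, t in keyed if k == name] for name in names}
-- ===== Notes on version B (the rewrite author's own statement) =====
-- stated objective: alternative
-- what changed: A fills a dict in one pass with setdefault-append; B first builds a (filename, task) pair list, deduplicates the filenames in first-seen order, and then builds each group with one comprehension per distinct filename.
import Mathlib
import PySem

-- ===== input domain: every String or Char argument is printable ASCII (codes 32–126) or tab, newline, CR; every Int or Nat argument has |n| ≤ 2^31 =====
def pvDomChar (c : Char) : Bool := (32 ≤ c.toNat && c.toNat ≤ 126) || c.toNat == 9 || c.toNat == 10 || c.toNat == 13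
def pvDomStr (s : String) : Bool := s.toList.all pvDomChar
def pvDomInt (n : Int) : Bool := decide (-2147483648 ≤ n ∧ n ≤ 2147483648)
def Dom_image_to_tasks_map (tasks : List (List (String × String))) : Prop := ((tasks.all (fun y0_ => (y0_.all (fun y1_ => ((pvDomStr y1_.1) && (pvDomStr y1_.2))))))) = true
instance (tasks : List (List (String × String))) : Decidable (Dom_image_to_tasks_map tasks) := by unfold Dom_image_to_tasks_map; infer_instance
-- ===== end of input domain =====

-- B builds the (filename, task) pairs first, then one group per distinct filename; objective: alternative (same output, same key order).

-- ===== PORT A =====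

-- t.get('photoURL'): first-match lookup in the association list (exact for the dict convention)
def pvAlistGet? (t : List (String × String)) (k : String) : Option String :=
  match t with
  | [] => none
  | (a, b) :: rest => if a == k then some b else pvAlistGet? rest k

-- (t.get('photoURL') or '').strip(): None → '' and '' → '' coincide with getD ''
def pvUrlOf (t : List (String × String)) : String :=
  PySem.Str.strip ((pvAlistGet? t "photoURL").getD "")

-- mapping.setdefault(name, []).append(t) on the insertion-ordered mapping
def pvSdAppend (m : List (String × List (List (String × String)))) (name : String)
    (t : List (String × String)) : List (String × List (List (String × String))) :=
  match m with
  | [] => [(name, [t])]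
  | (k, v) :: rest =>
      if k == name then (k, v ++ [t]) :: rest else (k, v) :: pvSdAppend rest name t

-- one iteration of A's for-loop
def pvAStep (mapping : List (String × List (List (String × String))))
    (t : List (String × String)) : List (String × List (List (String × String))) :=
  let url := pvUrlOf t
  if url == "" then mapping
  else
    -- url.split('/')[-1]: split never returns an empty list, so [-1] is the last element
    pvSdAppend mapping ((((PySem.Str.split? url "/").getD []).getLastD "")) t

def image_to_tasks_map (tasks : List (List (String × String))) : List (String × List (List (String × String))) :=
  tasks.foldl pvAStep []

-- ===== PORT B =====

-- the (filename, task) pair kept for t, or none when the stripped URL is empty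
def pvKeyOf? (t : List (String × String)) : Option (String × List (String × String)) :=
  let url := pvUrlOf t
  if url == "" then none
  else some ((((PySem.Str.split? url "/").getD []).getLastD ""), t)

def image_to_tasks_map_alt (tasks : List (List (String × String))) : List (String × List (List (String × String))) :=
  let keyed := tasks.filterMap pvKeyOf?
  -- list(dict.fromkeys(k for k, _ in keyed)): first-seen dedup of the filenames
  let names := keyed.foldl (fun acc p => if p.1 ∈ acc then acc else acc ++ [p.1]) []
  names.map (fun name => (name, (keyed.filter (fun p => p.1 == name)).map Prod.snd))

-- ===== PRECONDITION & SPEC =====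
def Spec_image_to_tasks_map (tasks : List (List (String × String))) (out : List (String × List (List (String × String)))) : Prop := out = image_to_tasks_map_alt tasks
instance (tasks : List (List (String × String))) (out : List (String × List (List (String × String)))) : Decidable (Spec_image_to_tasks_map tasks out) := by unfold Spec_image_to_tasks_map; infer_instance

-- ===== CLAIM (what is proved, stated in full; the proofs are below) =====
def Claim_equal_image_to_tasks_map : Prop := ∀ (tasks : List (List (String × String))), Dom_image_to_tasks_map tasks → Spec_image_to_tasks_map tasks (image_to_tasks_map tasks)

-- ===== LEMMAS AND PROOFS =====

-- first-occurrence keys of a keyed list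
def pvFkeys {a : Type} : List (String × a) → List String
  | [] => []
  | (k, _) :: rest => k :: (pvFkeys rest).filter (fun x => x != k)

-- the canonical grouping both programs compute
def pvGSpec (ps : List (String × List (String × String))) : List (String × List (List (String × String))) :=
  (pvFkeys ps).map (fun k => (k, (ps.filter (fun p => p.1 == k)).map Prod.snd))

theorem pv_mem_fkeys {a : Type} (k : String) (ps : List (String × a)) :
    k ∈ pvFkeys ps ↔ k ∈ ps.map Prod.fst := by
  induction ps with
  | nil => simp [pvFkeys]
  | cons p rest ih =>
      obtain ⟨a1, a2⟩ := p
      by_cases hk : k = a1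
      · subst hk; simp [pvFkeys]
      · simp [pvFkeys, List.mem_filter, hk, ih]

theorem pv_nodup_fkeys {a : Type} (ps : List (String × a)) : (pvFkeys ps).Nodup := by
  induction ps with
  | nil => simp [pvFkeys]
  | cons p rest ih =>
      obtain ⟨a1, a2⟩ := p
      simp only [pvFkeys, List.nodup_cons]
      refine ⟨fun h => ?_, List.Nodup.filter _ ih⟩
      have := (List.mem_filter.mp h).2
      simp at this

theorem pv_fkeys_append {a : Type} (ps : List (String × a)) (k : String) (t : a) :
    pvFkeys (ps ++ [(k, t)]) =
      if k ∈ pvFkeys ps then pvFkeys ps else pvFkeys ps ++ [k] := by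
  induction ps with
  | nil => simp [pvFkeys]
  | cons p rest ih =>
      obtain ⟨a1, a2⟩ := p
      have hmem : (k ∈ pvFkeys ((a1, a2) :: rest)) ↔ (k = a1 ∨ k ∈ pvFkeys rest) := by
        by_cases hk : k = a1
        · subst hk; simp [pvFkeys]
        · simp [pvFkeys, List.mem_filter, hk]
      by_cases hm : k ∈ pvFkeys rest
      · rw [if_pos (hmem.mpr (Or.inr hm))]
        show a1 :: (pvFkeys (rest ++ [(k, t)])).filter (fun x => x != a1) =
          a1 :: (pvFkeys rest).filter (fun x => x != a1)
        rw [ih, if_pos hm]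
      · by_cases hk : k = a1
        · subst hk
          rw [if_pos (hmem.mpr (Or.inl rfl))]
          show k :: (pvFkeys (rest ++ [(k, t)])).filter (fun x => x != k) =
            k :: (pvFkeys rest).filter (fun x => x != k)
          rw [ih, if_neg hm, List.filter_append]
          simp
        · have h2 : k ∉ pvFkeys ((a1, a2) :: rest) := fun h => (hmem.mp h).elim hk hm
          rw [if_neg h2]
          show a1 :: (pvFkeys (rest ++ [(k, t)])).filter (fun x => x != a1) =
            (a1 :: (pvFkeys rest).filter (fun x => x != a1)) ++ [k]
          rw [ih, if_neg hm, List.filter_append]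
          simp [hk]

-- B's first-seen dedup fold computes pvFkeys
theorem pv_dedup_foldl {a : Type} (ps qs : List (String × a)) :
    ps.foldl (fun acc p => if p.1 ∈ acc then acc else acc ++ [p.1]) (pvFkeys qs) =
      pvFkeys (qs ++ ps) := by
  induction ps generalizing qs with
  | nil => simp
  | cons p rest ih =>
      obtain ⟨k, t⟩ := p
      simp only [List.foldl_cons]
      rw [show (if k ∈ pvFkeys qs then pvFkeys qs else pvFkeys qs ++ [k]) =
          pvFkeys (qs ++ [(k, t)]) from (pv_fkeys_append qs k t).symm]
      rw [ih (qs ++ [(k, t)])]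
      simp

theorem pv_filter_nil_of_not_mem {a : Type} (k : String) (ps : List (String × a))
    (h : k ∉ ps.map Prod.fst) : ps.filter (fun p => p.1 == k) = [] := by
  induction ps with
  | nil => rfl
  | cons p rest ih =>
      simp only [List.map_cons, List.mem_cons] at h
      push_neg at h
      simp [List.filter_cons, Ne.symm h.1, ih h.2]

theorem pv_sdAppend_map (ks : List String) (g : String → List (List (String × String)))
    (k : String) (t : List (String × String)) (hnd : ks.Nodup) :
    pvSdAppend (ks.map fun k' => (k', g k')) k t =
      if k ∈ ks then ks.map (fun k' => (k', if k' == k then g k' ++ [t] else g k'))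
      else ks.map (fun k' => (k', g k')) ++ [(k, [t])] := by
  induction ks with
  | nil => simp [pvSdAppend]
  | cons a rest ih =>
      rw [List.nodup_cons] at hnd
      by_cases hk : a = k
      · subst hk
        simp only [List.map_cons, pvSdAppend, beq_self_eq_true, if_pos, List.mem_cons, true_or,
          if_true]
        congr 1
        apply List.map_congr_left
        intro x hx
        have hxa : x ≠ a := fun h => hnd.1 (h ▸ hx)
        simp [hxa]
      · simp only [List.map_cons, pvSdAppend]
        rw [if_neg (by simpa using hk)]
        rw [ih hnd.2]
        by_cases hm : k ∈ rest
        · rw [if_pos hm, if_pos (by simp [hm])]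
          simp [hk]
        · rw [if_neg hm, if_neg (by simp [hm, Ne.symm, hk])]
          simp

theorem pv_step (qs : List (String × List (String × String))) (k : String)
    (t : List (String × String)) :
    pvSdAppend (pvGSpec qs) k t = pvGSpec (qs ++ [(k, t)]) := by
  unfold pvGSpec
  rw [pv_sdAppend_map _ _ _ _ (pv_nodup_fkeys qs), pv_fkeys_append]
  by_cases hm : k ∈ pvFkeys qs
  · rw [if_pos hm, if_pos hm]
    apply List.map_congr_left
    intro x _
    by_cases hx : x = k
    · subst hx; simp [List.filter_append, List.filter_cons]
    · simp [List.filter_append, List.filter_cons, hx, Ne.symm hx]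
  · rw [if_neg hm, if_neg hm, List.map_append, List.map_singleton]
    congr 1
    · apply List.map_congr_left
      intro x hx
      have hx' : x ≠ k := fun h => hm (h ▸ hx)
      simp [List.filter_append, List.filter_cons, hx', Ne.symm hx']
    · have : qs.filter (fun p => p.1 == k) = [] :=
        pv_filter_nil_of_not_mem k qs (fun h => hm ((pv_mem_fkeys k qs).mpr h))
      simp [List.filter_append, List.filter_cons, this]

theorem pv_foldA (ps qs : List (String × List (String × String))) :
    ps.foldl (fun m p => pvSdAppend m p.1 p.2) (pvGSpec qs) = pvGSpec (qs ++ ps) := by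
  induction ps generalizing qs with
  | nil => simp
  | cons p rest ih =>
      obtain ⟨k, t⟩ := p
      simp only [List.foldl_cons]
      rw [pv_step, ih]
      simp

theorem pv_A_keyed (tasks : List (List (String × String)))
    (m : List (String × List (List (String × String)))) :
    tasks.foldl pvAStep m =
      (tasks.filterMap pvKeyOf?).foldl (fun m p => pvSdAppend m p.1 p.2) m := by
  induction tasks generalizing m with
  | nil => rfl
  | cons t rest ih =>
      simp only [List.foldl_cons, List.filterMap_cons]
      by_cases h : (pvUrlOf t == "") = true
      · rw [show pvAStep m t = m from by simp [pvAStep, h]]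
        rw [show pvKeyOf? t = none from by simp [pvKeyOf?, h]]
        exact ih m
      · rw [show pvAStep m t =
            pvSdAppend m (((PySem.Str.split? (pvUrlOf t) "/").getD []).getLastD "") t from by
          simp [pvAStep, h]]
        rw [show pvKeyOf? t =
            some ((((PySem.Str.split? (pvUrlOf t) "/").getD []).getLastD ""), t) from by
          simp [pvKeyOf?, h]]
        simp only [List.foldl_cons]
        exact ih _

-- B's result is the canonical grouping of its keyed list
theorem pv_alt_eq_gSpec (tasks : List (List (String × String))) :
    image_to_tasks_map_alt tasks = pvGSpec (tasks.filterMap pvKeyOf?) := by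
  have h := pv_dedup_foldl (tasks.filterMap pvKeyOf?)
    ([] : List (String × List (String × String)))
  rw [show pvFkeys ([] : List (String × List (String × String))) = [] from rfl,
    List.nil_append] at h
  unfold image_to_tasks_map_alt pvGSpec
  simp only [h]

-- ===== VERDICT (by name: the statement is the Claim_ definition above) =====
theorem image_to_tasks_map_spec : Claim_equal_image_to_tasks_map := by
  intro tasks _
  unfold Spec_image_to_tasks_map image_to_tasks_map
  rw [pv_A_keyed, pv_alt_eq_gSpec]
  rw [show ([] : List (String × List (List (String × String)))) = pvGSpec [] from rfl]
  rw [pv_foldA]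
  simp
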